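-- pv_equiv track=rewrite | github.com/bochap-udacity/dsand-p0 | Task4.py | getTelemarketerCallNumber
-- ===== SOURCE A (Python) =====
-- def getTelemarketerCallNumber(callData):
--     """
--         Returns a set containing numbers that are telemarketer numbers that make outgoing calls but receive incoming calls.
--     """
--     numbers = set()
--     nonTelemarketerNumbers = set()
--     for index in range(len(callData)):
--         row = callData[index]
--         if row[0] not in nonTelemarketerNumbers:
--             numbers.add(row[0])
--
--         if row[1] in numbers:
--             nonTelemarketerNumbers.add(row[1])
--             numbers.remove(row[1])
--
--     return numbers
-- ===== SOURCE B (Python) =====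
-- def getTelemarketerCallNumber(callData):
--     """
--         Returns a set containing numbers that are telemarketer numbers that make outgoing calls but receive incoming calls.
--     """
--     first_caller = {}
--     last_receiver = {}
--     for i, row in enumerate(callData):
--         if row[0] not in first_caller:
--             first_caller[row[0]] = i
--         last_receiver[row[1]] = i
--     return {num for num, f in first_caller.items()
--             if last_receiver.get(num, -1) < f}
-- ===== Notes on version B (the rewrite author's own statement) =====
-- stated objective: alternative
-- what changed: Replaces A's incremental add/remove set state machine with two index tables built in one pass (first index each number calls, last index it receives) and a final comparison pass: a number is kept iff its last receiving index is strictly below its first calling index.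
import Mathlib
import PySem

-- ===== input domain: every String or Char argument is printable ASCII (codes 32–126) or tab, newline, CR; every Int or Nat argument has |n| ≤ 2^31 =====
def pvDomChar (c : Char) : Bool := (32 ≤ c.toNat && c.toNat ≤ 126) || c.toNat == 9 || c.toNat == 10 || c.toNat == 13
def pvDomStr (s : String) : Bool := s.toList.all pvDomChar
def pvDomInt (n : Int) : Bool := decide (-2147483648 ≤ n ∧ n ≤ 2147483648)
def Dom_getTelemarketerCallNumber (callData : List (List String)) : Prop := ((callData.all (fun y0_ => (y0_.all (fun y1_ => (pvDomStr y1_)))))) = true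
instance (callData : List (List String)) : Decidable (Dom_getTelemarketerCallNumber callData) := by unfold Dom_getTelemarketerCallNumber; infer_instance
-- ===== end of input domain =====

-- B replaces A's incremental add/remove set state machine by two index dictionaries
-- (first calling index, last receiving index) combined in a final pass (objective: alternative).


-- ===== PORT A =====
-- one iteration of A's loop (state = (numbers, nonTelemarketerNumbers)); row[0]/row[1] via pyGetD,
-- exact on rows of length ≥ 2 (Pre_ below excludes the shorter rows, where Python raises IndexError)
def pvRowA (st : PySem.Set String × PySem.Set String) (row : List String) :
    PySem.Set String × PySem.Set String :=
  let numbers :=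
    if !PySem.Set.contains st.2 (PySem.List.pyGetD row 0 "") then
      PySem.Set.add st.1 (PySem.List.pyGetD row 0 "")
    else st.1
  if PySem.Set.contains numbers (PySem.List.pyGetD row 1 "") then
    ((PySem.Set.remove? numbers (PySem.List.pyGetD row 1 "")).getD numbers,
     PySem.Set.add st.2 (PySem.List.pyGetD row 1 ""))
  else (numbers, st.2)

def getTelemarketerCallNumber (callData : List (List String)) : List String :=
  ((PySem.List.pyRange 0 (callData.length : Int) 1).foldl
      (fun st index => pvRowA st (PySem.List.pyGetD callData index []))
      (PySem.Set.empty, PySem.Set.empty)).1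

-- ===== PORT B =====
-- one iteration of B's loop (state = (first_caller, last_receiver))
def pvRowB (st : PySem.Dict String Int × PySem.Dict String Int) (p : Int × List String) :
    PySem.Dict String Int × PySem.Dict String Int :=
  let fc := if st.1.contains (PySem.List.pyGetD p.2 0 "") then st.1
            else st.1.insert (PySem.List.pyGetD p.2 0 "") p.1
  (fc, st.2.insert (PySem.List.pyGetD p.2 1 "") p.1)

def getTelemarketerCallNumber_alt (callData : List (List String)) : List String :=
  let d := (PySem.List.enumerate callData 0).foldl pvRowB (PySem.Dict.empty, PySem.Dict.empty)
  PySem.Set.ofList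
    ((d.1.items.filter (fun q => decide (d.2.getD q.1 (-1) < q.2))).map (·.1))

-- ===== PRECONDITION & SPEC =====
-- Pre_ excludes exactly the inputs where A raises IndexError: a row with fewer than two entries.
def Pre_getTelemarketerCallNumber (callData : List (List String)) : Prop :=
  ∀ row ∈ callData, 2 ≤ row.length
instance (callData : List (List String)) : Decidable (Pre_getTelemarketerCallNumber callData) := by unfold Pre_getTelemarketerCallNumber; infer_instance
def pvWitness_getTelemarketerCallNumber : List (List String) := [["1", "2"], ["2", "1"]]

def Spec_getTelemarketerCallNumber (callData : List (List String)) (out : List String) : Prop := out = getTelemarketerCallNumber_alt callData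
instance (callData : List (List String)) (out : List String) : Decidable (Spec_getTelemarketerCallNumber callData out) := by unfold Spec_getTelemarketerCallNumber; infer_instance

-- ===== CLAIM (what is proved, stated in full; the proofs are below) =====
def Claim_equal_getTelemarketerCallNumber : Prop := ∀ (callData : List (List String)), Dom_getTelemarketerCallNumber callData → Pre_getTelemarketerCallNumber callData → Spec_getTelemarketerCallNumber callData (getTelemarketerCallNumber callData)


-- ===== LEMMAS AND PROOFS =====

-- B's filtering predicate
def pvPred (lr : PySem.Dict String Int) (q : String × Int) : Bool :=
  decide (lr.getD q.1 (-1) < q.2)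

-- the coupling invariant between A's state (nums, nonTel) and B's state (fc, lr)
-- after processing a prefix of s rows
def pvInv (s : Int) (nums nonTel : List String) (fc lr : PySem.Dict String Int) : Prop :=
  0 <= s ∧ fc.keys.Nodup ∧
  (∀ n v, fc.get? n = some v → 0 <= v ∧ v < s) ∧
  (∀ n v, lr.get? n = some v → 0 <= v ∧ v < s) ∧
  nums = (fc.items.filter (pvPred lr)).map (·.1) ∧
  (∀ n : String, n ∈ nonTel ↔ ∃ f l, fc.get? n = some f ∧ lr.get? n = some l ∧ f <= l)

lemma pv_mem_filter_map (fc lr : PySem.Dict String Int) (hnd : fc.keys.Nodup) (n : String) :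
    n ∈ (fc.items.filter (pvPred lr)).map (·.1) ↔
      ∃ f, fc.get? n = some f ∧ lr.getD n (-1) < f := by
  simp only [List.mem_map, List.mem_filter]
  constructor
  · rintro ⟨⟨k, v⟩, ⟨hmem, hp⟩, rfl⟩
    exact ⟨v, PySem.Dict.get?_of_mem_items fc hmem hnd, by simpa [pvPred] using hp⟩
  · rintro ⟨f, hget, hlt⟩
    exact ⟨(n, f), ⟨PySem.Dict.mem_items_of_get?_eq_some fc hget, by simpa [pvPred] using hlt⟩, rfl⟩

-- the invariant is preserved by one parallel step of the two loops
lemma pvInv_step (s : Int) (nums nonTel : List String) (fc lr : PySem.Dict String Int)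
    (row : List String) (h : pvInv s nums nonTel fc lr) :
    pvInv (s + 1) (pvRowA (nums, nonTel) row).1 (pvRowA (nums, nonTel) row).2
      (pvRowB (fc, lr) (s, row)).1 (pvRowB (fc, lr) (s, row)).2 := by
  obtain ⟨hs, hnd, hfc, hlr, hnums, hnt⟩ := h
  set r0 := PySem.List.pyGetD row 0 "" with hr0
  set r1 := PySem.List.pyGetD row 1 "" with hr1
  -- intermediate states after the caller (row[0]) half of the step
  set nums1 := (if !PySem.Set.contains nonTel r0 then PySem.Set.add nums r0 else nums)
    with hnums1def
  set fc1 := (if fc.contains r0 then fc else fc.insert r0 s) with hfc1def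
  have hA : pvRowA (nums, nonTel) row =
      (if PySem.Set.contains nums1 r1 then
        (PySem.Set.discard nums1 r1, PySem.Set.add nonTel r1)
       else (nums1, nonTel)) := by
    simp only [pvRowA, ← hr0, ← hr1, ← hnums1def]
    split
    · rename_i hm
      rw [PySem.Set.remove?_of_mem ((PySem.Set.contains_iff _ _).mp hm)]
      rfl
    · rfl
  have hB : pvRowB (fc, lr) (s, row) = (fc1, lr.insert r1 s) := by
    simp only [pvRowB, ← hr0, ← hr1, ← hfc1def]
  -- caller-half facts
  have hnd1 : fc1.keys.Nodup := by
    rw [hfc1def]; split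
    · exact hnd
    · exact PySem.Dict.nodup_keys_insert _ _ _ hnd
  have hfc1 : ∀ n v, fc1.get? n = some v → 0 <= v ∧ v <= s := by
    rw [hfc1def]; split
    · intro n v hv; have := hfc n v hv; omega
    · intro n v hv
      rw [PySem.Dict.get?_insert] at hv
      split at hv
      · cases hv; omega
      · have := hfc n v hv; omega
  have hnums1 : nums1 = (fc1.items.filter (pvPred lr)).map (·.1) := by
    by_cases hc : fc.contains r0 = true
    · -- r0 is already a key of fc
      have hfc1eq : fc1 = fc := by rw [hfc1def, if_pos hc]
      obtain ⟨f, hf⟩ : ∃ f, fc.get? r0 = some f := by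
        have h1 := PySem.Dict.contains_eq_isSome_get? fc r0
        rw [hc] at h1
        exact Option.isSome_iff_exists.mp h1.symm
      by_cases hmem : r0 ∈ nonTel
      · have hcm : PySem.Set.contains nonTel r0 = true := (PySem.Set.contains_iff _ _).mpr hmem
        rw [hnums1def, hfc1eq, ← hnums, hcm]
        simp
      · -- r0 not non-telemarketer, hence already in nums: the add is a no-op
        have hin : r0 ∈ nums := by
          rw [hnums, pv_mem_filter_map fc lr hnd]
          refine ⟨f, hf, ?_⟩
          rcases hget : lr.get? r0 with _ | l
          · rw [PySem.Dict.getD_of_get?_eq_none _ _ hget]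
            have := hfc r0 f hf; omega
          · rw [PySem.Dict.getD_of_get?_eq_some _ _ hget]
            by_contra hge
            exact hmem ((hnt r0).mpr ⟨f, l, hf, hget, by omega⟩)
        have hcm : PySem.Set.contains nonTel r0 = false := by
          rcases hx : PySem.Set.contains nonTel r0
          · rfl
          · exact absurd ((PySem.Set.contains_iff _ _).mp hx) hmem
        rw [hnums1def, hfc1eq, ← hnums, hcm]
        simp [PySem.Set.add_of_mem hin]
    · -- r0 is a fresh key: both sides append r0
      have hc' : fc.contains r0 = false := by simpa using hc
      have hget0 : fc.get? r0 = none := by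
        have h1 := PySem.Dict.contains_eq_isSome_get? fc r0
        rw [hc'] at h1
        exact Option.not_isSome_iff_eq_none.mp (by rw [← h1]; simp)
      have hfc1eq : fc1 = fc.insert r0 s := by rw [hfc1def, if_neg (by simp [hc'])]
      have hnmem : r0 ∉ nonTel := by
        intro hx
        obtain ⟨f, l, hf, -, -⟩ := (hnt r0).mp hx
        rw [hget0] at hf; cases hf
      have hnin : r0 ∉ nums := by
        rw [hnums, pv_mem_filter_map fc lr hnd]
        rintro ⟨f, hf, -⟩; rw [hget0] at hf; cases hf
      have hcm : PySem.Set.contains nonTel r0 = false := by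
        rcases hx : PySem.Set.contains nonTel r0
        · rfl
        · exact absurd ((PySem.Set.contains_iff _ _).mp hx) hnmem
      have hpred : pvPred lr (r0, s) = true := by
        simp only [pvPred, decide_eq_true_eq]
        rcases hget : lr.get? r0 with _ | l
        · rw [PySem.Dict.getD_of_get?_eq_none _ _ hget]; omega
        · rw [PySem.Dict.getD_of_get?_eq_some _ _ hget]
          have := hlr r0 l hget; omega
      rw [hnums1def, hfc1eq, hcm, PySem.Dict.items_insert_of_not_contains fc s hc',
        List.filter_append, List.map_append, ← hnums]
      simp [PySem.Set.add_of_not_mem hnin, hpred]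
  have hnt1 : ∀ n : String, n ∈ nonTel ↔
      ∃ f l, fc1.get? n = some f ∧ lr.get? n = some l ∧ f <= l := by
    intro n
    by_cases hc : fc.contains r0 = true
    · rw [hfc1def, if_pos hc]; exact hnt n
    · have hc' : fc.contains r0 = false := by simpa using hc
      have hget0 : fc.get? r0 = none := by
        have h1 := PySem.Dict.contains_eq_isSome_get? fc r0
        rw [hc'] at h1
        exact Option.not_isSome_iff_eq_none.mp (by rw [← h1]; simp)
      rw [hfc1def, if_neg (by simp [hc'])]
      by_cases hn : n = r0
      · rw [hn]
        constructor
        · intro hx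
          obtain ⟨f, l, hf, -, -⟩ := (hnt r0).mp hx
          rw [hget0] at hf; cases hf
        · rintro ⟨f, l, hf, hl, hfl⟩
          rw [PySem.Dict.get?_insert_self] at hf
          cases hf
          have := hlr r0 l hl; omega
      · rw [PySem.Dict.get?_insert_of_ne fc s hn]; exact hnt n
  have hmemnums1 : ∀ n, n ∈ nums1 ↔ ∃ f, fc1.get? n = some f ∧ lr.getD n (-1) < f := by
    intro n; rw [hnums1]; exact pv_mem_filter_map fc1 lr hnd1 n
  -- the receiver (row[1]) half: B's new filtered list is nums1 without r1
  have hkey : (fc1.items.filter (pvPred (lr.insert r1 s))).map (·.1) =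
      nums1.filter (fun y => !(y == r1)) := by
    have hcong : fc1.items.filter (pvPred (lr.insert r1 s)) =
        fc1.items.filter (fun q => (!(q.1 == r1)) && pvPred lr q) := by
      apply List.filter_congr
      intro q hq
      by_cases hh : q.1 = r1
      · have hle : q.2 <= s := (hfc1 q.1 q.2 (PySem.Dict.get?_of_mem_items fc1
          (by rwa [← Prod.mk.eta (p := q)] at hq) hnd1)).2
        simp only [pvPred, hh, PySem.Dict.getD_insert_self, beq_self_eq_true, Bool.not_true,
          Bool.false_and, decide_eq_false_iff_not]
        omega
      · simp [pvPred, PySem.Dict.getD_insert_of_ne lr s (-1) hh, hh]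
    rw [hcong, ← List.filter_filter, hnums1, List.filter_map]
    rfl
  -- new bounds for last_receiver
  have hlr1 : ∀ n v, (lr.insert r1 s).get? n = some v → 0 <= v ∧ v < s + 1 := by
    intro n v hv
    rw [PySem.Dict.get?_insert] at hv
    split at hv
    · cases hv; omega
    · have := hlr n v hv; omega
  by_cases hmm : r1 ∈ nums1
  · -- r1 is a candidate: A discards it and marks it non-telemarketer
    have hm : PySem.Set.contains nums1 r1 = true := (PySem.Set.contains_iff _ _).mpr hmm
    rw [hA, hB, if_pos hm]
    refine ⟨by omega, hnd1, fun n v hv => by have := hfc1 n v hv; omega, hlr1, ?_, ?_⟩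
    · rw [hkey]; rfl
    · intro n
      by_cases hn : n = r1
      · rw [hn, PySem.Set.mem_add]
        constructor
        · intro _
          obtain ⟨f, hf, -⟩ := (hmemnums1 r1).mp hmm
          exact ⟨f, s, hf, by rw [PySem.Dict.get?_insert_self], (hfc1 r1 f hf).2⟩
        · intro _; exact Or.inr rfl
      · rw [PySem.Set.mem_add, PySem.Dict.get?_insert_of_ne lr s hn]
        constructor
        · intro hx
          rcases hx with hx | hx
          · exact (hnt1 n).mp hx
          · exact absurd hx hn
        · intro hx; exact Or.inl ((hnt1 n).mpr hx)
  · -- r1 not currently a candidate: A leaves the state alone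
    have hm : PySem.Set.contains nums1 r1 = false := by
      rcases hx : PySem.Set.contains nums1 r1
      · rfl
      · exact absurd ((PySem.Set.contains_iff _ _).mp hx) hmm
    rw [hA, hB, if_neg (by simpa using hmm)]
    refine ⟨by omega, hnd1, fun n v hv => by have := hfc1 n v hv; omega, hlr1, ?_, ?_⟩
    · -- the filter is the identity here since r1 ∉ nums1
      rw [hkey]
      refine (List.filter_eq_self.mpr ?_).symm
      intro y hy
      have hne : y ≠ r1 := fun e => hmm (e ▸ hy)
      simp [hne]
    · intro n
      by_cases hn : n = r1
      · rw [hn]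
        constructor
        · intro hx
          obtain ⟨f, l, hf, hl, hfl⟩ := (hnt1 r1).mp hx
          have := hlr r1 l hl
          exact ⟨f, s, hf, by rw [PySem.Dict.get?_insert_self], by omega⟩
        · rintro ⟨f, l, hf, hl, hfl⟩
          rw [PySem.Dict.get?_insert_self] at hl
          cases hl
          rcases hget : lr.get? r1 with _ | l'
          · exfalso
            apply hmm
            rw [hmemnums1 r1]
            refine ⟨f, hf, ?_⟩
            rw [PySem.Dict.getD_of_get?_eq_none _ _ hget]
            have := hfc1 r1 f hf; omega
          · by_cases hord : f <= l'
            · exact (hnt1 r1).mpr ⟨f, l', hf, hget, hord⟩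
            · exfalso
              apply hmm
              rw [hmemnums1 r1]
              refine ⟨f, hf, ?_⟩
              rw [PySem.Dict.getD_of_get?_eq_some _ _ hget]
              omega
      · rw [PySem.Dict.get?_insert_of_ne lr s hn]; exact hnt1 n

lemma pvMain (rows : List (List String)) : ∀ (s : Int)
    (st : PySem.Set String × PySem.Set String)
    (d : PySem.Dict String Int × PySem.Dict String Int),
    pvInv s st.1 st.2 d.1 d.2 →
    pvInv (s + rows.length)
      (rows.foldl pvRowA st).1 (rows.foldl pvRowA st).2
      ((PySem.List.enumerate rows s).foldl pvRowB d).1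
      ((PySem.List.enumerate rows s).foldl pvRowB d).2 := by
  induction rows with
  | nil => intro s st d h; simpa [PySem.List.enumerate] using h
  | cons r rows ih =>
    intro s st d h
    rw [PySem.List.enumerate_cons]
    simp only [List.foldl_cons, List.length_cons]
    have hstep := pvInv_step s st.1 st.2 d.1 d.2 r h
    have hind := ih (s + 1) (pvRowA (st.1, st.2) r) (pvRowB (d.1, d.2) (s, r)) hstep
    simpa [add_comm, add_left_comm, add_assoc] using hind

lemma pvInv_zero : pvInv 0 [] [] PySem.Dict.empty PySem.Dict.empty := by
  refine ⟨le_refl 0, ?_, ?_, ?_, ?_, ?_⟩ <;>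
    simp [PySem.Dict.empty, PySem.Dict.keys, PySem.Dict.get?]

-- ===== VERDICT (by name: the statement is the Claim_ definition above) =====
theorem getTelemarketerCallNumber_spec : Claim_equal_getTelemarketerCallNumber := by
  intro callData _ _
  show getTelemarketerCallNumber callData = getTelemarketerCallNumber_alt callData
  have hmain := pvMain callData 0 (PySem.Set.empty, PySem.Set.empty)
    (PySem.Dict.empty, PySem.Dict.empty) pvInv_zero
  obtain ⟨-, hnd, -, -, hnums, -⟩ := hmain
  unfold getTelemarketerCallNumber getTelemarketerCallNumber_alt
  rw [PySem.List.foldl_pyRange_zero_pyGetD' callData [] pvRowA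
    (PySem.Set.empty, PySem.Set.empty)]
  rw [hnums]
  refine (PySem.Set.ofList_eq_self_of_nodup _ ?_).symm
  exact (List.filter_sublist.map _).nodup (by simpa [PySem.Dict.keys] using hnd)
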